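-- pv_equiv track=rewrite | github.com/3127qy/Texas_2021_2 | test/test3.py | getTempAllCards
-- ===== SOURCE A (Python) =====
-- allCards = ['<0,0>','<0,1>','<0,2>','<0,3>','<0,4>','<0,5>','<0,6>','<0,7>','<0,8>','<0,9>','<0,10>','<0,11>','<0,12>',
--             '<1,0>','<1,1>','<1,2>','<1,3>','<1,4>','<1,5>','<1,6>','<1,7>','<1,8>','<1,9>','<1,10>','<1,11>','<1,12>',
--             '<2,0>','<2,1>','<2,2>','<2,3>','<2,4>','<2,5>','<2,6>','<2,7>','<2,8>','<2,9>','<2,10>','<2,11>','<2,12>',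
--             '<3,0>','<3,1>','<3,2>','<3,3>','<3,4>','<3,5>','<3,6>','<3,7>','<3,8>','<3,9>','<3,10>','<3,11>','<3,12>',]
--
-- def getTempAllCards(handCards,boardCards,opCards = None):
--
--     # 先将先讲所有牌存入零时变量
--     tempAllCards = allCards[0:]
--
--     # for i in allCards:
--     #     tempAllCards.append(i)
--
--     # 再在所有牌中删去已知的牌
--     for i in handCards:
--         if i in tempAllCards:
--             tempAllCards.remove(i)
--
--     for i in boardCards:
--         if i in tempAllCards:
--             tempAllCards.remove(i)
--
--     if opCards is not None:
--         for i in opCards: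
--             if i in tempAllCards:
--                 tempAllCards.remove(i)
--
--
--     return tempAllCards
-- ===== SOURCE B (Python) =====
-- allCards = ['<0,0>','<0,1>','<0,2>','<0,3>','<0,4>','<0,5>','<0,6>','<0,7>','<0,8>','<0,9>','<0,10>','<0,11>','<0,12>',
--             '<1,0>','<1,1>','<1,2>','<1,3>','<1,4>','<1,5>','<1,6>','<1,7>','<1,8>','<1,9>','<1,10>','<1,11>','<1,12>',
--             '<2,0>','<2,1>','<2,2>','<2,3>','<2,4>','<2,5>','<2,6>','<2,7>','<2,8>','<2,9>','<2,10>','<2,11>','<2,12>',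
--             '<3,0>','<3,1>','<3,2>','<3,3>','<3,4>','<3,5>','<3,6>','<3,7>','<3,8>','<3,9>','<3,10>','<3,11>','<3,12>',]
--
-- def getTempAllCards(handCards, boardCards, opCards=None):
--     removed = set(handCards) | set(boardCards)
--     if opCards is not None:
--         removed |= set(opCards)
--     return [c for c in allCards if c not in removed]
-- ===== Notes on version B (the rewrite author's own statement) =====
-- stated objective: faster
-- what changed: B builds one union set of all known cards and filters the fixed deck in a single pass, instead of copying the deck and repeatedly scanning/mutating it with 'in' + .remove per known card.
import Mathlib
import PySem

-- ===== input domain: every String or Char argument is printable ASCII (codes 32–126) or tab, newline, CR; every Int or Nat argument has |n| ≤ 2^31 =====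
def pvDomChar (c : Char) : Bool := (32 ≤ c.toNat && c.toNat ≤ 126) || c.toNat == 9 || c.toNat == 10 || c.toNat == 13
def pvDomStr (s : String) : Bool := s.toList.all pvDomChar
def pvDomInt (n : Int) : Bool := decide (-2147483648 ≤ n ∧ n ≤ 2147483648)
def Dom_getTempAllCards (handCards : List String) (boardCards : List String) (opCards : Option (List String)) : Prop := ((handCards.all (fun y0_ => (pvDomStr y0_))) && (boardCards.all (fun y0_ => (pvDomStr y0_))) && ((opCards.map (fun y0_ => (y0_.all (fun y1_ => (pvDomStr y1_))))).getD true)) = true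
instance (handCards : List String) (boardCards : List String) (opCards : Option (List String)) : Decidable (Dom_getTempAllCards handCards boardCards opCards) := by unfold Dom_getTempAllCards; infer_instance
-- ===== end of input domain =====

-- B builds one union set of all known cards and filters the fixed deck in a single pass,
-- instead of copying the deck and repeatedly scanning/mutating it with 'in' + .remove.

def pvAllCards : List String :=
  ["<0,0>","<0,1>","<0,2>","<0,3>","<0,4>","<0,5>","<0,6>","<0,7>","<0,8>","<0,9>","<0,10>","<0,11>","<0,12>",
   "<1,0>","<1,1>","<1,2>","<1,3>","<1,4>","<1,5>","<1,6>","<1,7>","<1,8>","<1,9>","<1,10>","<1,11>","<1,12>",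
   "<2,0>","<2,1>","<2,2>","<2,3>","<2,4>","<2,5>","<2,6>","<2,7>","<2,8>","<2,9>","<2,10>","<2,11>","<2,12>",
   "<3,0>","<3,1>","<3,2>","<3,3>","<3,4>","<3,5>","<3,6>","<3,7>","<3,8>","<3,9>","<3,10>","<3,11>","<3,12>"]

-- ===== PORT A =====
-- 'for i in cards: if i in temp: temp.remove(i)'  (remove? is some here since the guard holds)
def pvRemovePass (temp : List String) (cards : List String) : List String :=
  cards.foldl (fun acc i => if acc.contains i then (PySem.List.remove? acc i).getD acc else acc) temp

def getTempAllCards (handCards : List String) (boardCards : List String) (opCards : Option (List String)) : List String :=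
  let tempAllCards := PySem.List.slice pvAllCards (some 0) none   -- allCards[0:]
  let tempAllCards := pvRemovePass tempAllCards handCards
  let tempAllCards := pvRemovePass tempAllCards boardCards
  let tempAllCards :=
    match opCards with
    | some op => pvRemovePass tempAllCards op
    | none => tempAllCards
  tempAllCards

-- ===== PORT B =====
def getTempAllCards_alt (handCards : List String) (boardCards : List String) (opCards : Option (List String)) : List String :=
  let removed : PySem.Set String := PySem.Set.union (PySem.Set.ofList handCards) boardCards
  let removed : PySem.Set String :=
    match opCards with
    | some op => PySem.Set.union removed op
    | none => removed
  pvAllCards.filter (fun c => !(PySem.Set.contains removed c))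

-- ===== PRECONDITION & SPEC =====
def Spec_getTempAllCards (handCards : List String) (boardCards : List String) (opCards : Option (List String)) (out : List String) : Prop := out = getTempAllCards_alt handCards boardCards opCards
instance (handCards : List String) (boardCards : List String) (opCards : Option (List String)) (out : List String) : Decidable (Spec_getTempAllCards handCards boardCards opCards out) := by unfold Spec_getTempAllCards; infer_instance

-- ===== CLAIM (what is proved, stated in full; the proofs are below) =====
def Claim_equal_getTempAllCards : Prop := ∀ (handCards : List String) (boardCards : List String) (opCards : Option (List String)), Dom_getTempAllCards handCards boardCards opCards → Spec_getTempAllCards handCards boardCards opCards (getTempAllCards handCards boardCards opCards)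

-- ===== LEMMAS AND PROOFS =====

-- One guarded-remove pass on a duplicate-free list is a filter.
theorem pvRemovePass_eq_filter (cards : List String) :
    ∀ (l : List String), l.Nodup →
      pvRemovePass l cards = l.filter (fun c => !(cards.contains c)) := by
  induction cards with
  | nil => intro l _; simp [pvRemovePass]
  | cons x cards ih =>
    intro l hl
    have hstep : (if l.contains x then (PySem.List.remove? l x).getD l else l)
        = l.filter (fun c => !(c == x)) := by
      by_cases hx : x ∈ l
      · rw [if_pos (by simpa using hx), PySem.List.remove?_eq_some_erase l x hx]
        simp [List.Nodup.erase_eq_filter hl, bne]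
      · rw [if_neg (by simpa using hx)]
        exact (List.filter_eq_self.2 (fun c hc => by
          simp [Ne]; rintro rfl; exact hx hc)).symm
    have hnd : (l.filter (fun c => !(c == x))).Nodup := hl.filter _
    calc pvRemovePass l (x :: cards)
        = pvRemovePass (if l.contains x then (PySem.List.remove? l x).getD l else l) cards := rfl
      _ = pvRemovePass (l.filter (fun c => !(c == x))) cards := by rw [hstep]
      _ = (l.filter (fun c => !(c == x))).filter (fun c => !(cards.contains c)) := ih _ hnd
      _ = l.filter (fun c => !((x :: cards).contains c)) := by
          rw [List.filter_filter]
          apply List.filter_congr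
          intro c _
          by_cases h : c = x <;> simp [h]

theorem pvAllCards_nodup : pvAllCards.Nodup := by decide

-- ===== VERDICT (by name: the statement is the Claim_ definition above) =====
theorem getTempAllCards_spec : Claim_equal_getTempAllCards := by
  intro h b op _
  show getTempAllCards h b op = getTempAllCards_alt h b op
  have nd0 := pvAllCards_nodup
  have h1 := pvRemovePass_eq_filter h pvAllCards nd0
  have nd1 : (pvAllCards.filter (fun c => !(h.contains c))).Nodup := nd0.filter _
  have h2 := pvRemovePass_eq_filter b _ nd1
  cases op with
  | none =>
    simp only [getTempAllCards, getTempAllCards_alt, PySem.List.slice_zero_start,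
      PySem.List.slice_none_none, h1, h2, List.filter_filter]
    apply List.filter_congr
    intro c _
    simp only [List.contains_eq_mem, PySem.Set.contains, PySem.Set.mem_union,
      PySem.Set.mem_ofList, Bool.decide_or, Bool.not_or]
    exact Bool.and_comm _ _
  | some o =>
    have nd2 : ((pvAllCards.filter (fun c => !(h.contains c))).filter
        (fun c => !(b.contains c))).Nodup := nd1.filter _
    have h3 := pvRemovePass_eq_filter o _ nd2
    simp only [getTempAllCards, getTempAllCards_alt, PySem.List.slice_zero_start,
      PySem.List.slice_none_none, h1, h2]
    rw [h3]
    simp only [List.filter_filter]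
    apply List.filter_congr
    intro c _
    simp only [List.contains_eq_mem, PySem.Set.contains, PySem.Set.mem_union,
      PySem.Set.mem_ofList, Bool.decide_or, Bool.not_or]
    by_cases c1 : c ∈ h <;> by_cases c2 : c ∈ b <;> by_cases c3 : c ∈ o <;>
      simp [c1, c2, c3]
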